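-- pv_equiv track=rewrite | github.com/bhi5hmaraj/APRG-2020 | Assignment 4/truck_driving_solutions/BMC201963/BMC201963.py | likekruskal
-- ===== SOURCE A (Python) =====
-- def likekruskal (l,n):
--     p = [[0 for x in range(n)] for y in range(n)]
--     c = [[(i+1)] for i in range(n)]
--     for k in l:
--         if c[k[0]-1] != c[k[1]-1]:
--             for i in c[k[0]-1]:
--                 for j in c[k[1]-1]:
--                     p[(i-1)][(j-1)] = k[2]
--             for i in c[k[1]-1]:
--                 for j in c[k[0]-1]:
--                     p[(i-1)][(j-1)] = k[2]
--             c[k[0]-1].extend(c[k[1]-1])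
--             for i in c[k[0]-1]:
--                 if i != k[0]:
--                     c[i-1] = c[k[0]-1]
--     return(p)
-- ===== SOURCE B (Python) =====
-- def likekruskal(l, n):
--     p = [[0] * n for _ in range(n)]
--     root = list(range(n))                 # 0-based root index of each node
--     members = [[i + 1] for i in range(n)] # member labels, valid at root indices
--     for k in l:
--         ra, rb = root[k[0] - 1], root[k[1] - 1]
--         if ra != rb:
--             w = k[2]
--             ma, mb = members[ra], members[rb]
--             if len(ma) < len(mb):
--                 ra, rb, ma, mb = rb, ra, mb, ma
--             for i in ma:
--                 for j in mb:
--                     p[i - 1][j - 1] = w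
--                     p[j - 1][i - 1] = w
--             for j in mb:
--                 root[j - 1] = ra
--             members[ra] = ma + mb
--     return p
-- ===== Notes on version B (the rewrite author's own statement) =====
-- stated objective: faster
-- what changed: A stores the full member list at every node (aliased lists, rewritten for every member of both components at each merge) and detects 'same component' by comparing two whole member lists; B keeps a union-find-style 0-based root index per node in an array plus member lists only at root slots, compares two root indices in O(1), and relabels only the absorbed (smaller) component.
-- outside the precondition, e.g. on likekruskal([[1, 1]], 1): A returns [[0]], B returns [[0]]
import Mathlib
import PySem

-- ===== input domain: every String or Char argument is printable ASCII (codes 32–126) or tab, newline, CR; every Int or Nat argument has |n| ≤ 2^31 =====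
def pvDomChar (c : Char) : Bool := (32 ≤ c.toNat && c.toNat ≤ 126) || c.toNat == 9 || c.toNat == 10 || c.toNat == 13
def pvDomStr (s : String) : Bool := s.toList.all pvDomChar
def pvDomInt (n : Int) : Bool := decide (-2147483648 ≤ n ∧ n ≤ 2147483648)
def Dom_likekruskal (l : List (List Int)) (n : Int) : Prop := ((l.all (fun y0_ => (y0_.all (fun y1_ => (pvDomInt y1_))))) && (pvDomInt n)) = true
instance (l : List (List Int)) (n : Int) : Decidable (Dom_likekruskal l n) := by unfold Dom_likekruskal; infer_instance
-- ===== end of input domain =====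

-- B replaces A's aliased shared member-lists (rewritten for every member of both components
-- at each merge, and compared list-by-list in the guard) with a union-find-style 0-based root
-- index per node plus member lists kept only at root slots, relabelling only the smaller
-- component and comparing two root indices in the guard.

-- Python list subscript for an index in [-len, len): negative indices wrap (exact on the
-- index range Pre_ admits; out-of-range subscripts raise in Python and are outside Pre_).
def pvIdx (m : Nat) (x : Int) : Nat := if x < 0 then (x + m).toNat else x.toNat

-- ===== PORT A =====
-- `p[r][s] = w`; both subscripts come from stored member labels, which are always ≥ 1,
-- so `.toNat` is exact here.
def pvSetCell (p : List (List Int)) (r s : Int) (w : Int) : List (List Int) :=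
  p.set r.toNat ((p.getD r.toNat []).set s.toNat w)

def pvStepA (st : List (List Int) × List (List Int)) (k : List Int) :
    List (List Int) × List (List Int) :=
  let a := k.getD 0 0
  let b := k.getD 1 0
  let La := st.2.getD (pvIdx st.2.length (a - 1)) []
  let Lb := st.2.getD (pvIdx st.2.length (b - 1)) []
  if La ≠ Lb then
    let w := k.getD 2 0
    let p1 := La.foldl (fun p i => Lb.foldl (fun p j => pvSetCell p (i - 1) (j - 1) w) p) st.1
    let p2 := Lb.foldl (fun p i => La.foldl (fun p j => pvSetCell p (i - 1) (j - 1) w) p) p1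
    let L := La ++ Lb
    let c1 := st.2.set (pvIdx st.2.length (a - 1)) L
    let c2 := L.foldl (fun c i => if i ≠ a then c.set (i - 1).toNat L else c) c1
    (p2, c2)
  else st

def likekruskal (l : List (List Int)) (n : Int) : List (List Int) :=
  (l.foldl pvStepA
    (List.replicate n.toNat (List.replicate n.toNat (0 : Int)),
     (List.range n.toNat).map (fun i : Nat => ([(i : Int) + 1] : List Int)))).1

-- ===== PORT B =====
def pvStepB (st : List (List Int) × List Int × List (List Int)) (k : List Int) :
    List (List Int) × List Int × List (List Int) :=
  let ra := st.2.1.getD (pvIdx st.2.1.length (k.getD 0 0 - 1)) 0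
  let rb := st.2.1.getD (pvIdx st.2.1.length (k.getD 1 0 - 1)) 0
  if ra ≠ rb then
    let w := k.getD 2 0
    let ma := st.2.2.getD ra.toNat []
    let mb := st.2.2.getD rb.toNat []
    let q := if ma.length < mb.length then (rb, ra, mb, ma) else (ra, rb, ma, mb)
    let p := q.2.2.1.foldl
      (fun p i => q.2.2.2.foldl
        (fun p j => pvSetCell (pvSetCell p (i - 1) (j - 1) w) (j - 1) (i - 1) w) p) st.1
    let root := q.2.2.2.foldl (fun r j => r.set (j - 1).toNat q.1) st.2.1
    let members := st.2.2.set q.1.toNat (q.2.2.1 ++ q.2.2.2)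
    (p, root, members)
  else st

def likekruskal_alt (l : List (List Int)) (n : Int) : List (List Int) :=
  (l.foldl pvStepB
    (List.replicate n.toNat (List.replicate n.toNat (0 : Int)),
     (List.range n.toNat).map (fun i : Nat => (i : Int)),
     (List.range n.toNat).map (fun i : Nat => ([(i : Int) + 1] : List Int)))).1

-- ===== PRECONDITION & SPEC =====
-- Pre_ excludes edges with fewer than 3 entries (A raises IndexError on them whenever the edge
-- first joins two components) and node labels whose list subscript label-1 falls outside
-- [-n, n), on which A raises IndexError (labels in [1-n, 0] wrap around in A; B's list-based
-- union-find wraps identically and is proved equal there).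
def Pre_likekruskal (l : List (List Int)) (n : Int) : Prop :=
  ∀ k ∈ l, 3 ≤ k.length ∧ 1 - n ≤ k.getD 0 0 ∧ k.getD 0 0 ≤ n ∧
    1 - n ≤ k.getD 1 0 ∧ k.getD 1 0 ≤ n
instance (l : List (List Int)) (n : Int) : Decidable (Pre_likekruskal l n) := by
  unfold Pre_likekruskal; infer_instance

def pvWitness_likekruskal : List (List Int) × Int := ([[1, 2, 5], [2, 3, 7]], 3)

def Spec_likekruskal (l : List (List Int)) (n : Int) (out : List (List Int)) : Prop := out = likekruskal_alt l n
instance (l : List (List Int)) (n : Int) (out : List (List Int)) : Decidable (Spec_likekruskal l n out) := by unfold Spec_likekruskal; infer_instance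

-- ===== CLAIM (what is proved, stated in full; the proofs are below) =====
def Claim_equal_likekruskal : Prop := ∀ (l : List (List Int)) (n : Int), Dom_likekruskal l n → Pre_likekruskal l n → Spec_likekruskal l n (likekruskal l n)

-- ===== LEMMAS AND PROOFS =====

-- abbreviations used only by the proofs
def pvRng (n v : Int) : Prop := 1 ≤ v ∧ v ≤ n
def pvCA (c : List (List Int)) (v : Int) : List Int := c.getD (v - 1).toNat []
def pvRT (root : List Int) (v : Int) : Int := root.getD (v - 1).toNat 0
def pvMB (root : List Int) (mems : List (List Int)) (v : Int) : List Int :=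
  mems.getD (pvRT root v).toNat []
def pvCell (p : List (List Int)) (r s : Nat) : Int := (p.getD r []).getD s 0
def pvRowLen (p : List (List Int)) (t : Nat) : Nat := (p.getD t []).length

def pvShape (n : Int) (p : List (List Int)) : Prop :=
  p.length = n.toNat ∧ ∀ t, pvRowLen p t = if t < n.toNat then n.toNat else 0

def pvInv (n : Int) (c : List (List Int)) (root : List Int)
    (mems : List (List Int)) : Prop :=
  c.length = n.toNat ∧ root.length = n.toNat ∧ mems.length = n.toNat ∧
  (∀ v, pvRng n v → 0 ≤ pvRT root v ∧ pvRT root v < n) ∧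
  (∀ v w, pvRng n v → pvRng n w → pvRT root v = pvRT root w → pvCA c v = pvCA c w) ∧
  (∀ v w, pvRng n v → pvRng n w → (w ∈ pvCA c v ↔ pvRT root w = pvRT root v)) ∧
  (∀ v w, pvRng n v → pvRng n w → (w ∈ pvMB root mems v ↔ pvRT root w = pvRT root v)) ∧
  (∀ v, pvRng n v → ∀ x ∈ pvCA c v, pvRng n x) ∧
  (∀ v, pvRng n v → ∀ x ∈ pvMB root mems v, pvRng n x)

theorem length_pvSetCell (p : List (List Int)) (r s w : Int) :
    (pvSetCell p r s w).length = p.length := by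
  simp [pvSetCell]

theorem pvRowLen_pvSetCell (p : List (List Int)) (r s w : Int) (t : Nat) :
    pvRowLen (pvSetCell p r s w) t = pvRowLen p t := by
  simp only [pvSetCell, pvRowLen, List.getD_eq_getElem?_getD, List.getElem?_set]
  by_cases h : r.toNat = t
  · subst h
    by_cases hl : r.toNat < p.length
    · simp [hl]
    · simp [hl]
  · simp [h]

theorem pvCell_pvSetCell (p : List (List Int)) (i j w : Int) (r s : Nat) :
    pvCell (pvSetCell p i j w) r s =
      if i.toNat = r ∧ j.toNat = s ∧ r < p.length ∧ s < pvRowLen p r then w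
      else pvCell p r s := by
  simp only [pvSetCell, pvCell, pvRowLen, List.getD_eq_getElem?_getD, List.getElem?_set]
  by_cases h1 : i.toNat = r
  · subst h1
    by_cases hl : i.toNat < p.length
    · simp only [hl, if_true]
      by_cases h2 : j.toNat = s
      · subst h2
        by_cases hs : j.toNat < (p[i.toNat]?.getD []).length
        · simp_all
        · simp_all [List.getD_eq_getElem?_getD, List.getElem?_set]
      · simp_all [List.getD_eq_getElem?_getD, List.getElem?_set]
    · simp [hl, Nat.not_lt.mp hl]
  · simp [h1]

theorem pvLen_foldl {α : Type} (f : List (List Int) → α → List (List Int))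
    (h : ∀ p x, (f p x).length = p.length) (L : List α) (p : List (List Int)) :
    (L.foldl f p).length = p.length := by
  induction L generalizing p with
  | nil => rfl
  | cons x t ih => simp [List.foldl_cons, ih, h]

theorem pvRowLen_foldl {α : Type} (f : List (List Int) → α → List (List Int))
    (h : ∀ p x t, pvRowLen (f p x) t = pvRowLen p t) (L : List α) (p : List (List Int)) (t : Nat) :
    pvRowLen (L.foldl f p) t = pvRowLen p t := by
  induction L generalizing p with
  | nil => rfl
  | cons x s ih => simp [List.foldl_cons, ih, h]


theorem pvIf_merge {C1 C2 C : Prop} [Decidable C1] [Decidable C2] [Decidable C]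
    (h : C ↔ C1 ∨ C2) {α : Type} (w cell : α) :
    (if C2 then w else if C1 then w else cell) = if C then w else cell := by
  by_cases h1 : C1 <;> by_cases h2 : C2 <;> simp [h, h1, h2]

theorem pvCell_foldl_row (Lb : List Int) (i' w : Int) (p : List (List Int))
    (r s : Nat) :
    pvCell (Lb.foldl (fun p j => pvSetCell p i' (j - 1) w) p) r s =
      if (i'.toNat = r ∧ (∃ j ∈ Lb, (j - 1).toNat = s)) ∧ r < p.length ∧ s < pvRowLen p r
      then w else pvCell p r s := by
  induction Lb generalizing p with
  | nil => simp
  | cons j t ih =>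
    rw [List.foldl_cons, ih, length_pvSetCell, pvRowLen_pvSetCell, pvCell_pvSetCell]
    refine pvIf_merge ?_ w _
    constructor
    · rintro ⟨⟨hR, j', hj', hP⟩, hb1, hb2⟩
      rcases List.mem_cons.mp hj' with rfl | hm
      · exact Or.inl ⟨hR, hP, hb1, hb2⟩
      · exact Or.inr ⟨⟨hR, j', hm, hP⟩, hb1, hb2⟩
    · rintro (⟨hR, hP, hb1, hb2⟩ | ⟨⟨hR, j', hm, hP⟩, hb1, hb2⟩)
      · exact ⟨⟨hR, j, List.mem_cons_self, hP⟩, hb1, hb2⟩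
      · exact ⟨⟨hR, j', List.mem_cons_of_mem _ hm, hP⟩, hb1, hb2⟩

theorem pvCell_fillA (La Lb : List Int) (w : Int) (p : List (List Int)) (r s : Nat) :
    pvCell (La.foldl (fun p i => Lb.foldl (fun p j => pvSetCell p (i - 1) (j - 1) w) p) p) r s =
      if (∃ i ∈ La, ∃ j ∈ Lb, (i - 1).toNat = r ∧ (j - 1).toNat = s) ∧
          r < p.length ∧ s < pvRowLen p r then w
      else pvCell p r s := by
  induction La generalizing p with
  | nil => simp
  | cons i t ih =>
    rw [List.foldl_cons, ih,
      pvLen_foldl _ (fun p x => length_pvSetCell p _ _ _) Lb,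
      pvRowLen_foldl _ (fun p x t => pvRowLen_pvSetCell p _ _ _ t) Lb,
      pvCell_foldl_row]
    refine pvIf_merge ?_ w _
    constructor
    · rintro ⟨⟨i', hi', j', hj', hP, hQ⟩, hb⟩
      rcases List.mem_cons.mp hi' with rfl | hm
      · exact Or.inl ⟨⟨hP, j', hj', hQ⟩, hb⟩
      · exact Or.inr ⟨⟨i', hm, j', hj', hP, hQ⟩, hb⟩
    · rintro (⟨⟨hP, j', hj', hQ⟩, hb⟩ | ⟨⟨i', hm, j', hj', hP, hQ⟩, hb⟩)
      · exact ⟨⟨i, List.mem_cons_self, j', hj', hP, hQ⟩, hb⟩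
      · exact ⟨⟨i', List.mem_cons_of_mem _ hm, j', hj', hP, hQ⟩, hb⟩

theorem pvCell_setPair (p : List (List Int)) (i j w : Int) (r s : Nat) :
    pvCell (pvSetCell (pvSetCell p (i - 1) (j - 1) w) (j - 1) (i - 1) w) r s =
      if (((i - 1).toNat = r ∧ (j - 1).toNat = s) ∨ ((j - 1).toNat = r ∧ (i - 1).toNat = s)) ∧
          r < p.length ∧ s < pvRowLen p r then w
      else pvCell p r s := by
  rw [pvCell_pvSetCell, length_pvSetCell, pvRowLen_pvSetCell, pvCell_pvSetCell]
  refine pvIf_merge ?_ w _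
  constructor
  · rintro ⟨(⟨h1, h2⟩ | ⟨h1, h2⟩), hb1, hb2⟩
    · exact Or.inl ⟨h1, h2, hb1, hb2⟩
    · exact Or.inr ⟨h1, h2, hb1, hb2⟩
  · rintro (⟨h1, h2, hb1, hb2⟩ | ⟨h1, h2, hb1, hb2⟩)
    · exact ⟨Or.inl ⟨h1, h2⟩, hb1, hb2⟩
    · exact ⟨Or.inr ⟨h1, h2⟩, hb1, hb2⟩

theorem pvCell_fillB_row (mb : List Int) (i w : Int) (p : List (List Int)) (r s : Nat) :
    pvCell (mb.foldl (fun p j => pvSetCell (pvSetCell p (i - 1) (j - 1) w) (j - 1) (i - 1) w) p) r s =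
      if (∃ j ∈ mb, ((i - 1).toNat = r ∧ (j - 1).toNat = s) ∨ ((j - 1).toNat = r ∧ (i - 1).toNat = s)) ∧
          r < p.length ∧ s < pvRowLen p r then w
      else pvCell p r s := by
  induction mb generalizing p with
  | nil => simp
  | cons j t ih =>
    rw [List.foldl_cons, ih, length_pvSetCell, length_pvSetCell,
      pvRowLen_pvSetCell, pvRowLen_pvSetCell, pvCell_setPair]
    refine pvIf_merge ?_ w _
    constructor
    · rintro ⟨⟨j', hj', hD⟩, hb⟩
      rcases List.mem_cons.mp hj' with rfl | hm
      · exact Or.inl ⟨hD, hb⟩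
      · exact Or.inr ⟨⟨j', hm, hD⟩, hb⟩
    · rintro (⟨hD, hb⟩ | ⟨⟨j', hm, hD⟩, hb⟩)
      · exact ⟨⟨j, List.mem_cons_self, hD⟩, hb⟩
      · exact ⟨⟨j', List.mem_cons_of_mem _ hm, hD⟩, hb⟩

theorem pvCell_fillB (ma mb : List Int) (w : Int) (p : List (List Int)) (r s : Nat) :
    pvCell (ma.foldl (fun p i => mb.foldl
        (fun p j => pvSetCell (pvSetCell p (i - 1) (j - 1) w) (j - 1) (i - 1) w) p) p) r s =
      if (∃ i ∈ ma, ∃ j ∈ mb, ((i - 1).toNat = r ∧ (j - 1).toNat = s) ∨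
            ((j - 1).toNat = r ∧ (i - 1).toNat = s)) ∧
          r < p.length ∧ s < pvRowLen p r then w
      else pvCell p r s := by
  induction ma generalizing p with
  | nil => simp
  | cons i t ih =>
    rw [List.foldl_cons, ih,
      pvLen_foldl _ (fun p x => by rw [length_pvSetCell, length_pvSetCell]) mb,
      pvRowLen_foldl _ (fun p x t => by rw [pvRowLen_pvSetCell, pvRowLen_pvSetCell]) mb,
      pvCell_fillB_row]
    refine pvIf_merge ?_ w _
    constructor
    · rintro ⟨⟨i', hi', hD⟩, hb⟩
      rcases List.mem_cons.mp hi' with rfl | hm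
      · exact Or.inl ⟨hD, hb⟩
      · exact Or.inr ⟨⟨i', hm, hD⟩, hb⟩
    · rintro (⟨hD, hb⟩ | ⟨⟨i', hm, hD⟩, hb⟩)
      · exact ⟨⟨i, List.mem_cons_self, hD⟩, hb⟩
      · exact ⟨⟨i', List.mem_cons_of_mem _ hm, hD⟩, hb⟩

theorem pvMatrix_ext (p q : List (List Int)) (hl : p.length = q.length)
    (hr : ∀ t, pvRowLen p t = pvRowLen q t) (hc : ∀ r s, pvCell p r s = pvCell q r s) :
    p = q := by
  apply List.ext_getElem hl
  intro r hr1 hr2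
  apply List.ext_getElem
  · have := hr r
    simpa [pvRowLen, List.getD_eq_getElem?_getD, List.getElem?_eq_getElem, hr1, hr2] using this
  · intro s hs1 hs2
    have := hc r s
    simpa [pvCell, List.getD_eq_getElem?_getD, List.getElem?_eq_getElem, hr1, hr2,
      List.getElem?_eq_getElem, hs1, hs2] using this

theorem pvGetD_set {α : Type} (c : List α) (u t : Nat) (x d : α) :
    (c.set u x).getD t d = if u = t ∧ t < c.length then x else c.getD t d := by
  simp only [List.getD_eq_getElem?_getD, List.getElem?_set]
  by_cases h1 : u = t
  · subst h1
    by_cases h2 : u < c.length <;> simp [h2]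
  · simp [h1]

theorem length_cFold (L : List Int) (a : Int) (Lv : List Int) (c0 : List (List Int)) :
    (L.foldl (fun c i => if i ≠ a then c.set (i - 1).toNat Lv else c) c0).length = c0.length := by
  induction L generalizing c0 with
  | nil => rfl
  | cons i t ih =>
    rw [List.foldl_cons, ih]
    by_cases h : i ≠ a <;> simp [h]

theorem pvGetD_cFold (L : List Int) (a : Int) (Lv : List Int) (c0 : List (List Int)) (t : Nat) :
    (L.foldl (fun c i => if i ≠ a then c.set (i - 1).toNat Lv else c) c0).getD t [] =
      if (∃ i ∈ L, i ≠ a ∧ (i - 1).toNat = t) ∧ t < c0.length then Lv else c0.getD t [] := by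
  induction L generalizing c0 with
  | nil => simp
  | cons i s ih =>
    rw [List.foldl_cons, ih]
    by_cases hi : i ≠ a
    · rw [if_pos hi, List.length_set, pvGetD_set]
      refine pvIf_merge ?_ Lv _
      constructor
      · rintro ⟨⟨i', hi', hne, hidx⟩, hb⟩
        rcases List.mem_cons.mp hi' with rfl | hm
        · exact Or.inl ⟨hidx, hb⟩
        · exact Or.inr ⟨⟨i', hm, hne, hidx⟩, hb⟩
      · rintro (⟨hidx, hb⟩ | ⟨⟨i', hm, hne, hidx⟩, hb⟩)
        · exact ⟨⟨i, List.mem_cons_self, hi, hidx⟩, hb⟩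
        · exact ⟨⟨i', List.mem_cons_of_mem _ hm, hne, hidx⟩, hb⟩
    · rw [if_neg hi]
      push_neg at hi
      subst hi
      refine if_congr ?_ rfl rfl
      constructor
      · rintro ⟨⟨i', hm, hne, hidx⟩, hb⟩
        exact ⟨⟨i', List.mem_cons_of_mem _ hm, hne, hidx⟩, hb⟩
      · rintro ⟨⟨i', hi', hne, hidx⟩, hb⟩
        rcases List.mem_cons.mp hi' with rfl | hm
        · exact absurd rfl hne
        · exact ⟨⟨i', hm, hne, hidx⟩, hb⟩

theorem length_fillA (La Lb : List Int) (w : Int) (p : List (List Int)) :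
    (La.foldl (fun p i => Lb.foldl (fun p j => pvSetCell p (i - 1) (j - 1) w) p) p).length
      = p.length :=
  pvLen_foldl _ (fun p i => pvLen_foldl _ (fun p j => length_pvSetCell p _ _ _) Lb p) La p

theorem pvRowLen_fillA (La Lb : List Int) (w : Int) (p : List (List Int)) (t : Nat) :
    pvRowLen (La.foldl (fun p i => Lb.foldl (fun p j => pvSetCell p (i - 1) (j - 1) w) p) p) t
      = pvRowLen p t :=
  pvRowLen_foldl _ (fun p i t => pvRowLen_foldl _ (fun p j t => pvRowLen_pvSetCell p _ _ _ t) Lb p t) La p t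

theorem length_fillB (ma mb : List Int) (w : Int) (p : List (List Int)) :
    (ma.foldl (fun p i => mb.foldl
        (fun p j => pvSetCell (pvSetCell p (i - 1) (j - 1) w) (j - 1) (i - 1) w) p) p).length
      = p.length :=
  pvLen_foldl _ (fun p i => pvLen_foldl _
    (fun p j => by rw [length_pvSetCell, length_pvSetCell]) mb p) ma p

theorem pvRowLen_fillB (ma mb : List Int) (w : Int) (p : List (List Int)) (t : Nat) :
    pvRowLen (ma.foldl (fun p i => mb.foldl
        (fun p j => pvSetCell (pvSetCell p (i - 1) (j - 1) w) (j - 1) (i - 1) w) p) p) t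
      = pvRowLen p t :=
  pvRowLen_foldl _ (fun p i t => pvRowLen_foldl _
    (fun p j t => by rw [pvRowLen_pvSetCell, pvRowLen_pvSetCell]) mb p t) ma p t


theorem length_sFold (vs : List Int) (x : Int) (r0 : List Int) :
    (vs.foldl (fun r j => r.set (j - 1).toNat x) r0).length = r0.length := by
  induction vs generalizing r0 with
  | nil => rfl
  | cons j s ih => rw [List.foldl_cons, ih, List.length_set]

theorem pvGetD_sFold (vs : List Int) (x : Int) (r0 : List Int) (t : Nat) :
    (vs.foldl (fun r j => r.set (j - 1).toNat x) r0).getD t 0 =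
      if (∃ j ∈ vs, (j - 1).toNat = t) ∧ t < r0.length then x else r0.getD t 0 := by
  induction vs generalizing r0 with
  | nil => simp
  | cons j s ih =>
    rw [List.foldl_cons, ih, List.length_set, pvGetD_set]
    refine pvIf_merge ?_ x _
    constructor
    · rintro ⟨⟨j', hj', hje⟩, hb⟩
      rcases List.mem_cons.mp hj' with rfl | hm
      · exact Or.inl ⟨hje, hb⟩
      · exact Or.inr ⟨⟨j', hm, hje⟩, hb⟩
    · rintro (⟨hje, hb⟩ | ⟨⟨j', hm, hje⟩, hb⟩)
      · exact ⟨⟨j, List.mem_cons_self, hje⟩, hb⟩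
      · exact ⟨⟨j', List.mem_cons_of_mem _ hm, hje⟩, hb⟩

-- A's component-list rewrite loop, as a function of the label looked up.
-- `slot` is the (canonical) label whose cell the extend writes; `g` is the raw guard label.
theorem pvCA_update (c : List (List Int)) (n slot g : Int) (L : List Int)
    (hc : c.length = n.toNat) (hslot : pvRng n slot) (hg : g = slot ∨ g < 1)
    (hL : ∀ x ∈ L, pvRng n x) (hslotL : slot ∈ L) (v : Int) (hv : pvRng n v) :
    pvCA (L.foldl (fun c i => if i ≠ g then c.set (i - 1).toNat L else c)
        (c.set (slot - 1).toNat L)) v = if v ∈ L then L else pvCA c v := by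
  unfold pvCA
  rw [pvGetD_cFold, List.length_set, pvGetD_set]
  have hvb : (v - 1).toNat < c.length := by
    rcases hv with ⟨h1, h2⟩; rcases hslot with ⟨h3, h4⟩; omega
  by_cases hvL : v ∈ L
  · by_cases hvg : v ≠ g
    · rw [if_pos ⟨⟨v, hvL, hvg, rfl⟩, hvb⟩, if_pos hvL]
    · push_neg at hvg
      subst hvg
      have hvslot : v = slot := by
        rcases hg with h | h
        · exact h
        · rcases hv with ⟨h1, _⟩; omega
      by_cases h1 : (∃ i ∈ L, i ≠ v ∧ (i - 1).toNat = (v - 1).toNat) ∧ (v - 1).toNat < c.length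
      · rw [if_pos h1, if_pos hvL]
      · rw [if_neg h1, if_pos ⟨by omega, hvb⟩, if_pos hvL]
  · rw [if_neg, if_neg, if_neg hvL]
    · rintro ⟨he, _⟩
      have : slot = v := by rcases hslot with ⟨h1, _⟩; rcases hv with ⟨h2, _⟩; omega
      exact hvL (this ▸ hslotL)
    · rintro ⟨⟨i', hm, hne, hidx⟩, _⟩
      have hi' := hL i' hm
      have : i' = v := by rcases hi' with ⟨h1, _⟩; rcases hv with ⟨h2, _⟩; omega
      exact hvL (this ▸ hm)

-- the merge preserves the invariant (stated for the orientation B actually uses)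
theorem pvInv_merge (n : Int) (c : List (List Int)) (root : List Int)
    (mems : List (List Int)) (hinv : pvInv n c root mems)
    (ra' rb' : Int) (ma' mb' L : List Int) (hne : ra' ≠ rb')
    (hra' : 0 ≤ ra' ∧ ra' < n) (hrb' : 0 ≤ rb' ∧ rb' < n)
    (h1 : ∀ w, pvRng n w → (w ∈ ma' ↔ pvRT root w = ra'))
    (h2 : ∀ w, pvRng n w → (w ∈ mb' ↔ pvRT root w = rb'))
    (h3 : ∀ x ∈ ma', pvRng n x) (h4 : ∀ x ∈ mb', pvRng n x)
    (c2 : List (List Int)) (hlen : c2.length = n.toNat)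
    (hCA : ∀ v, pvRng n v →
      pvCA c2 v = if pvRT root v = ra' ∨ pvRT root v = rb' then L else pvCA c v)
    (hLmem : ∀ w, pvRng n w → (w ∈ L ↔ pvRT root w = ra' ∨ pvRT root w = rb'))
    (hLr : ∀ x ∈ L, pvRng n x) :
    pvInv n c2 (mb'.foldl (fun r j => r.set (j - 1).toNat ra') root)
      (mems.set ra'.toNat (ma' ++ mb')) := by
  obtain ⟨hI0, hRL, hML, hRV, hI1, hI2, hI3, hI4, hI5⟩ := hinv
  set root' := mb'.foldl (fun r j => r.set (j - 1).toNat ra') root with hroot'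
  have hRT' : ∀ v, pvRng n v → pvRT root' v = if v ∈ mb' then ra' else pvRT root v := by
    intro v hv
    unfold pvRT
    rw [hroot', pvGetD_sFold]
    by_cases hm : v ∈ mb'
    · rw [if_pos ⟨⟨v, hm, rfl⟩, by rcases hv with ⟨u1, u2⟩; omega⟩, if_pos hm]
    · rw [if_neg, if_neg hm]
      rintro ⟨⟨j, hj, hje⟩, _⟩
      have hjr := h4 j hj
      have : j = v := by rcases hjr with ⟨u1, _⟩; rcases hv with ⟨u2, _⟩; omega
      exact hm (this ▸ hj)
  have hRTc : ∀ v, pvRng n v →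
      pvRT root' v = if pvRT root v = ra' ∨ pvRT root v = rb' then ra' else pvRT root v := by
    intro v hv
    rw [hRT' v hv]
    by_cases hm : v ∈ mb'
    · rw [if_pos hm, if_pos (Or.inr ((h2 v hv).mp hm))]
    · by_cases hr : pvRT root v = ra'
      · rw [if_neg hm, if_pos (Or.inl hr), hr]
      · rw [if_neg hm, if_neg]
        rintro (h | h)
        · exact hr h
        · exact hm ((h2 v hv).mpr h)
  have hMB' : ∀ v, pvRng n v →
      pvMB root' (mems.set ra'.toNat (ma' ++ mb')) v =
        if pvRT root v = ra' ∨ pvRT root v = rb' then ma' ++ mb' else pvMB root mems v := by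
    intro v hv
    unfold pvMB
    rw [hRTc v hv]
    by_cases hin : pvRT root v = ra' ∨ pvRT root v = rb'
    · rw [if_pos hin, if_pos hin, pvGetD_set, if_pos ⟨rfl, by rcases hra' with ⟨u1, u2⟩; omega⟩]
    · rw [if_neg hin, if_neg hin, pvGetD_set, if_neg]
      rintro ⟨he, _⟩
      have hrv := hRV v hv
      have : ra' = pvRT root v := by rcases hra' with ⟨u1, _⟩; rcases hrv with ⟨u2, _⟩; omega
      exact hin (Or.inl this.symm)
  have hmemL' : ∀ w, pvRng n w →
      (w ∈ ma' ++ mb' ↔ pvRT root w = ra' ∨ pvRT root w = rb') := by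
    intro w hw
    rw [List.mem_append, h1 w hw, h2 w hw]
  refine ⟨hlen, by rw [hroot', length_sFold, hRL], by rw [List.length_set, hML], ?_,
    ?_, ?_, ?_, ?_, ?_⟩
  · -- root values stay in range
    intro v hv
    rw [hRTc v hv]
    by_cases hin : pvRT root v = ra' ∨ pvRT root v = rb'
    · rw [if_pos hin]; exact hra'
    · rw [if_neg hin]; exact hRV v hv
  · -- I1
    intro v w hv hw heq
    rw [hRTc v hv, hRTc w hw] at heq
    rw [hCA v hv, hCA w hw]
    by_cases hv1 : pvRT root v = ra' ∨ pvRT root v = rb' <;>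
      by_cases hw1 : pvRT root w = ra' ∨ pvRT root w = rb'
    · rw [if_pos hv1, if_pos hw1]
    · rw [if_pos hv1, if_neg hw1] at heq
      exact absurd (Or.inl heq.symm) hw1
    · rw [if_neg hv1, if_pos hw1] at heq
      exact absurd (Or.inl heq) hv1
    · rw [if_neg hv1, if_neg hw1] at heq
      rw [if_neg hv1, if_neg hw1]
      exact hI1 v w hv hw heq
  · -- I2
    intro v w hv hw
    rw [hCA v hv, hRTc v hv, hRTc w hw]
    by_cases hv1 : pvRT root v = ra' ∨ pvRT root v = rb' <;>
      by_cases hw1 : pvRT root w = ra' ∨ pvRT root w = rb'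
    · rw [if_pos hv1, if_pos hv1, if_pos hw1, hLmem w hw]
      exact ⟨fun _ => rfl, fun _ => hw1⟩
    · rw [if_pos hv1, if_pos hv1, if_neg hw1, hLmem w hw]
      exact ⟨fun h => absurd h hw1, fun h => absurd (Or.inl h) hw1⟩
    · rw [if_neg hv1, if_neg hv1, if_pos hw1, hI2 v w hv hw]
      exact ⟨fun h => absurd (h ▸ hw1) hv1, fun h => absurd (Or.inl h.symm) hv1⟩
    · rw [if_neg hv1, if_neg hv1, if_neg hw1, hI2 v w hv hw]
  · -- I3
    intro v w hv hw
    rw [hMB' v hv, hRTc v hv, hRTc w hw]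
    by_cases hv1 : pvRT root v = ra' ∨ pvRT root v = rb' <;>
      by_cases hw1 : pvRT root w = ra' ∨ pvRT root w = rb'
    · rw [if_pos hv1, if_pos hv1, if_pos hw1, hmemL' w hw]
      exact ⟨fun _ => rfl, fun _ => hw1⟩
    · rw [if_pos hv1, if_pos hv1, if_neg hw1, hmemL' w hw]
      exact ⟨fun h => absurd h hw1, fun h => absurd (Or.inl h) hw1⟩
    · rw [if_neg hv1, if_neg hv1, if_pos hw1, hI3 v w hv hw]
      exact ⟨fun h => absurd (h ▸ hw1) hv1, fun h => absurd (Or.inl h.symm) hv1⟩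
    · rw [if_neg hv1, if_neg hv1, if_neg hw1, hI3 v w hv hw]
  · -- I4
    intro v hv x hx
    rw [hCA v hv] at hx
    by_cases hv1 : pvRT root v = ra' ∨ pvRT root v = rb'
    · rw [if_pos hv1] at hx
      exact hLr x hx
    · rw [if_neg hv1] at hx
      exact hI4 v hv x hx
  · -- I5
    intro v hv x hx
    rw [hMB' v hv] at hx
    by_cases hv1 : pvRT root v = ra' ∨ pvRT root v = rb'
    · rw [if_pos hv1] at hx
      rcases List.mem_append.mp hx with h | h
      · exact h3 x h
      · exact h4 x h
    · rw [if_neg hv1] at hx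
      exact hI5 v hv x hx

theorem pvCells_iff (ma' mb' La Lb : List Int)
    (hma : ∀ x, x ∈ ma' ↔ x ∈ La) (hmb : ∀ x, x ∈ mb' ↔ x ∈ Lb) (r s : Nat) :
    (∃ i ∈ ma', ∃ j ∈ mb', ((i - 1).toNat = r ∧ (j - 1).toNat = s) ∨
        ((j - 1).toNat = r ∧ (i - 1).toNat = s))
    ↔ ((∃ i ∈ La, ∃ j ∈ Lb, (i - 1).toNat = r ∧ (j - 1).toNat = s) ∨
        (∃ i ∈ Lb, ∃ j ∈ La, (i - 1).toNat = r ∧ (j - 1).toNat = s)) := by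
  constructor
  · rintro ⟨i, hi, j, hj, (⟨e1, e2⟩ | ⟨e1, e2⟩)⟩
    · exact Or.inl ⟨i, (hma i).mp hi, j, (hmb j).mp hj, e1, e2⟩
    · exact Or.inr ⟨j, (hmb j).mp hj, i, (hma i).mp hi, e1, e2⟩
  · rintro (⟨i, hi, j, hj, e1, e2⟩ | ⟨i, hi, j, hj, e1, e2⟩)
    · exact ⟨i, (hma i).mpr hi, j, (hmb j).mpr hj, Or.inl ⟨e1, e2⟩⟩
    · exact ⟨j, (hma j).mpr hj, i, (hmb i).mpr hi, Or.inr ⟨e1, e2⟩⟩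

theorem pvMerge_sim (n a b w g : Int) (p c : List (List Int)) (root : List Int)
    (mems : List (List Int)) (hsh : pvShape n p) (hinv : pvInv n c root mems)
    (ha : pvRng n a) (hb : pvRng n b) (hg : g = a ∨ g < 1)
    (hG : pvRT root a ≠ pvRT root b)
    (ra' rb' : Int) (ma' mb' : List Int)
    (horien : (ra' = pvRT root a ∧ rb' = pvRT root b ∧
                ma' = pvMB root mems a ∧ mb' = pvMB root mems b)
            ∨ (ra' = pvRT root b ∧ rb' = pvRT root a ∧
                ma' = pvMB root mems b ∧ mb' = pvMB root mems a)) :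
    ((pvCA c b).foldl (fun p i => (pvCA c a).foldl (fun p j => pvSetCell p (i - 1) (j - 1) w) p)
       ((pvCA c a).foldl (fun p i => (pvCA c b).foldl (fun p j => pvSetCell p (i - 1) (j - 1) w) p) p))
      = ma'.foldl (fun p i => mb'.foldl
          (fun p j => pvSetCell (pvSetCell p (i - 1) (j - 1) w) (j - 1) (i - 1) w) p) p
    ∧ pvShape n ((pvCA c b).foldl
        (fun p i => (pvCA c a).foldl (fun p j => pvSetCell p (i - 1) (j - 1) w) p)
        ((pvCA c a).foldl (fun p i => (pvCA c b).foldl (fun p j => pvSetCell p (i - 1) (j - 1) w) p) p))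
    ∧ pvInv n
        ((pvCA c a ++ pvCA c b).foldl
          (fun c' i => if i ≠ g then c'.set (i - 1).toNat (pvCA c a ++ pvCA c b) else c')
          (c.set (a - 1).toNat (pvCA c a ++ pvCA c b)))
        (mb'.foldl (fun r j => r.set (j - 1).toNat ra') root)
        (mems.set ra'.toNat (ma' ++ mb')) := by
  obtain ⟨hI0, hRL, hML, hRV, hI1, hI2, hI3, hI4, hI5⟩ := hinv
  -- membership characterizations
  have hLaCA : ∀ x, x ∈ pvCA c a ↔ (pvRng n x ∧ pvRT root x = pvRT root a) := by
    intro x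
    constructor
    · intro hx
      have hr := hI4 a ha x hx
      exact ⟨hr, (hI2 a x ha hr).mp hx⟩
    · rintro ⟨hr, he⟩
      exact (hI2 a x ha hr).mpr he
  have hLbCA : ∀ x, x ∈ pvCA c b ↔ (pvRng n x ∧ pvRT root x = pvRT root b) := by
    intro x
    constructor
    · intro hx
      have hr := hI4 b hb x hx
      exact ⟨hr, (hI2 b x hb hr).mp hx⟩
    · rintro ⟨hr, he⟩
      exact (hI2 b x hb hr).mpr he
  have hMa : ∀ x, x ∈ pvMB root mems a ↔ (pvRng n x ∧ pvRT root x = pvRT root a) := by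
    intro x
    constructor
    · intro hx
      have hr := hI5 a ha x hx
      exact ⟨hr, (hI3 a x ha hr).mp hx⟩
    · rintro ⟨hr, he⟩
      exact (hI3 a x ha hr).mpr he
  have hMb : ∀ x, x ∈ pvMB root mems b ↔ (pvRng n x ∧ pvRT root x = pvRT root b) := by
    intro x
    constructor
    · intro hx
      have hr := hI5 b hb x hx
      exact ⟨hr, (hI3 b x hb hr).mp hx⟩
    · rintro ⟨hr, he⟩
      exact (hI3 b x hb hr).mpr he
  have hcells : ∀ r s : Nat,
      (∃ i ∈ ma', ∃ j ∈ mb', ((i - 1).toNat = r ∧ (j - 1).toNat = s) ∨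
          ((j - 1).toNat = r ∧ (i - 1).toNat = s))
      ↔ ((∃ i ∈ pvCA c a, ∃ j ∈ pvCA c b, (i - 1).toNat = r ∧ (j - 1).toNat = s) ∨
          (∃ i ∈ pvCA c b, ∃ j ∈ pvCA c a, (i - 1).toNat = r ∧ (j - 1).toNat = s)) := by
    rcases horien with ⟨e1, e2, e3, e4⟩ | ⟨e1, e2, e3, e4⟩
    · intro r s
      exact pvCells_iff ma' mb' (pvCA c a) (pvCA c b)
        (fun x => by rw [e3, hMa x, hLaCA x]) (fun x => by rw [e4, hMb x, hLbCA x]) r s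
    · intro r s
      exact (pvCells_iff ma' mb' (pvCA c b) (pvCA c a)
        (fun x => by rw [e3, hMb x, hLbCA x]) (fun x => by rw [e4, hMa x, hLaCA x]) r s).trans
        or_comm
  refine ⟨?_, ?_, ?_⟩
  · -- fill equality
    apply pvMatrix_ext
    · rw [length_fillA, length_fillA, length_fillB]
    · intro t
      rw [pvRowLen_fillA, pvRowLen_fillA, pvRowLen_fillB]
    · intro r s
      rw [pvCell_fillA, length_fillA, pvRowLen_fillA, pvCell_fillA, pvCell_fillB]
      exact pvIf_merge ((and_congr_left' (hcells r s)).trans or_and_right) w _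
  · -- shape
    refine ⟨?_, ?_⟩
    · rw [length_fillA, length_fillA, hsh.1]
    · intro t
      rw [pvRowLen_fillA, pvRowLen_fillA]
      exact hsh.2 t
  · -- invariant
    have hne : ra' ≠ rb' := by
      rcases horien with ⟨e1, e2, _, _⟩ | ⟨e1, e2, _, _⟩
      · rw [e1, e2]; exact hG
      · rw [e1, e2]; exact fun h => hG h.symm
    have hLr : ∀ x ∈ pvCA c a ++ pvCA c b, pvRng n x := by
      intro x hx
      rcases List.mem_append.mp hx with h | h
      · exact hI4 a ha x h
      · exact hI4 b hb x h
    have hLmem : ∀ x, pvRng n x →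
        (x ∈ pvCA c a ++ pvCA c b ↔ pvRT root x = ra' ∨ pvRT root x = rb') := by
      intro x hx
      rw [List.mem_append, hLaCA x, hLbCA x]
      rcases horien with ⟨e1, e2, _, _⟩ | ⟨e1, e2, _, _⟩
      · rw [e1, e2]
        constructor
        · rintro (⟨_, h⟩ | ⟨_, h⟩) <;> [exact Or.inl h; exact Or.inr h]
        · rintro (h | h) <;> [exact Or.inl ⟨hx, h⟩; exact Or.inr ⟨hx, h⟩]
      · rw [e1, e2]
        constructor
        · rintro (⟨_, h⟩ | ⟨_, h⟩) <;> [exact Or.inr h; exact Or.inl h]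
        · rintro (h | h) <;> [exact Or.inr ⟨hx, h⟩; exact Or.inl ⟨hx, h⟩]
    have hCAm : ∀ v, pvRng n v →
        pvCA ((pvCA c a ++ pvCA c b).foldl
          (fun c' i => if i ≠ g then c'.set (i - 1).toNat (pvCA c a ++ pvCA c b) else c')
          (c.set (a - 1).toNat (pvCA c a ++ pvCA c b))) v
        = if pvRT root v = ra' ∨ pvRT root v = rb' then pvCA c a ++ pvCA c b else pvCA c v := by
      intro v hv
      rw [pvCA_update c n a g _ hI0 ha hg hLr
        (List.mem_append.mpr (Or.inl ((hLaCA a).mpr ⟨ha, rfl⟩))) v hv]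
      exact if_congr (hLmem v hv) rfl rfl
    have hra'b : 0 ≤ ra' ∧ ra' < n := by
      rcases horien with ⟨e1, _, _, _⟩ | ⟨e1, _, _, _⟩
      · rw [e1]; exact hRV a ha
      · rw [e1]; exact hRV b hb
    have hrb'b : 0 ≤ rb' ∧ rb' < n := by
      rcases horien with ⟨_, e2, _, _⟩ | ⟨_, e2, _, _⟩
      · rw [e2]; exact hRV b hb
      · rw [e2]; exact hRV a ha
    refine pvInv_merge n c root mems ⟨hI0, hRL, hML, hRV, hI1, hI2, hI3, hI4, hI5⟩ ra' rb' ma' mb'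
      (pvCA c a ++ pvCA c b) hne hra'b hrb'b ?_ ?_ ?_ ?_ _ ?_ hCAm hLmem hLr
    · intro x hx
      rcases horien with ⟨e1, _, e3, _⟩ | ⟨e1, _, e3, _⟩
      · rw [e3, hMa x, e1]
        exact ⟨fun h => h.2, fun h => ⟨hx, h⟩⟩
      · rw [e3, hMb x, e1]
        exact ⟨fun h => h.2, fun h => ⟨hx, h⟩⟩
    · intro x hx
      rcases horien with ⟨_, e2, _, e4⟩ | ⟨_, e2, _, e4⟩
      · rw [e4, hMb x, e2]
        exact ⟨fun h => h.2, fun h => ⟨hx, h⟩⟩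
      · rw [e4, hMa x, e2]
        exact ⟨fun h => h.2, fun h => ⟨hx, h⟩⟩
    · intro x hx
      rcases horien with ⟨_, _, e3, _⟩ | ⟨_, _, e3, _⟩
      · exact hI5 a ha x (e3 ▸ hx)
      · exact hI5 b hb x (e3 ▸ hx)
    · intro x hx
      rcases horien with ⟨_, _, _, e4⟩ | ⟨_, _, _, e4⟩
      · exact hI5 b hb x (e4 ▸ hx)
      · exact hI5 a ha x (e4 ▸ hx)
    · rw [length_cFold, List.length_set, hI0]

-- one edge preserves the simulation relation
theorem pvStep_sim (n : Int) (k : List Int) (p c : List (List Int))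
    (root : List Int) (mems : List (List Int))
    (ha : 1 - n ≤ k.getD 0 0 ∧ k.getD 0 0 ≤ n) (hb : 1 - n ≤ k.getD 1 0 ∧ k.getD 1 0 ≤ n)
    (hsh : pvShape n p) (hinv : pvInv n c root mems) :
    (pvStepA (p, c) k).1 = (pvStepB (p, root, mems) k).1 ∧
    pvShape n (pvStepA (p, c) k).1 ∧
    pvInv n (pvStepA (p, c) k).2 (pvStepB (p, root, mems) k).2.1 (pvStepB (p, root, mems) k).2.2 := by
  have hn1 : 1 ≤ n := by
    rcases ha with ⟨u1, u2⟩; omega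
  set a := k.getD 0 0 with hadef
  set b := k.getD 1 0 with hbdef
  set a2 := if a < 1 then a + n else a with ha2def
  set b2 := if b < 1 then b + n else b with hb2def
  have ha2r : pvRng n a2 := by
    rw [ha2def]; unfold pvRng
    rcases ha with ⟨u1, u2⟩
    by_cases h : a < 1 <;> simp [h] <;> omega
  have hb2r : pvRng n b2 := by
    rw [hb2def]; unfold pvRng
    rcases hb with ⟨u1, u2⟩
    by_cases h : b < 1 <;> simp [h] <;> omega
  have hidxa : pvIdx n.toNat (a - 1) = (a2 - 1).toNat := by
    rw [ha2def]; unfold pvIdx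
    rcases ha with ⟨u1, u2⟩
    by_cases h : a < 1
    · rw [if_pos (by omega), if_pos h]; omega
    · rw [if_neg (by omega), if_neg h]
  have hidxb : pvIdx n.toNat (b - 1) = (b2 - 1).toNat := by
    rw [hb2def]; unfold pvIdx
    rcases hb with ⟨u1, u2⟩
    by_cases h : b < 1
    · rw [if_pos (by omega), if_pos h]; omega
    · rw [if_neg (by omega), if_neg h]
  have hga : a = a2 ∨ a < 1 := by
    rw [ha2def]
    by_cases h : a < 1
    · exact Or.inr h
    · rw [if_neg h]; exact Or.inl rfl
  obtain ⟨hI0, hRL, hML, hRV, hI1, hI2, hI3, hI4, hI5⟩ := hinv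
  have hinv' : pvInv n c root mems := ⟨hI0, hRL, hML, hRV, hI1, hI2, hI3, hI4, hI5⟩
  have hguard : (pvCA c a2 = pvCA c b2) ↔ (pvRT root a2 = pvRT root b2) := by
    constructor
    · intro h
      have hmem : a2 ∈ pvCA c a2 := (hI2 a2 a2 ha2r ha2r).mpr rfl
      rw [h] at hmem
      exact (hI2 b2 a2 hb2r ha2r).mp hmem
    · intro h
      exact hI1 a2 b2 ha2r hb2r h
  simp only [pvStepA, pvStepB]
  rw [hI0, hRL, hidxa, hidxb]
  by_cases hG : pvRT root a2 = pvRT root b2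
  · -- no-op on both sides
    rw [if_neg (show ¬(c.getD (a2 - 1).toNat [] ≠ c.getD (b2 - 1).toNat []) from
        not_ne_iff.mpr (hguard.mpr hG)),
      if_neg (show ¬(root.getD (a2 - 1).toNat 0 ≠ root.getD (b2 - 1).toNat 0) from
        not_ne_iff.mpr hG)]
    exact ⟨rfl, hsh, hinv'⟩
  · have hmerge := pvMerge_sim n a2 b2 (k.getD 2 0) a p c root mems hsh hinv' ha2r hb2r hga hG
    have hA' : c.getD (a2 - 1).toNat [] ≠ c.getD (b2 - 1).toNat [] :=
      fun h => hG (hguard.mp h)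
    have hB' : root.getD (a2 - 1).toNat 0 ≠ root.getD (b2 - 1).toNat 0 := hG
    rw [if_pos hA', if_pos hB']
    by_cases hsw : (mems.getD (root.getD (a2 - 1).toNat 0).toNat []).length <
        (mems.getD (root.getD (b2 - 1).toNat 0).toNat []).length
    · rw [if_pos hsw]
      dsimp only
      obtain ⟨h1, h2, h3⟩ := hmerge (root.getD (b2 - 1).toNat 0) (root.getD (a2 - 1).toNat 0)
        (mems.getD (root.getD (b2 - 1).toNat 0).toNat []) (mems.getD (root.getD (a2 - 1).toNat 0).toNat [])
        (Or.inr ⟨rfl, rfl, rfl, rfl⟩)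
      exact ⟨h1, h2, h3⟩
    · rw [if_neg hsw]
      dsimp only
      obtain ⟨h1, h2, h3⟩ := hmerge (root.getD (a2 - 1).toNat 0) (root.getD (b2 - 1).toNat 0)
        (mems.getD (root.getD (a2 - 1).toNat 0).toNat []) (mems.getD (root.getD (b2 - 1).toNat 0).toNat [])
        (Or.inl ⟨rfl, rfl, rfl, rfl⟩)
      exact ⟨h1, h2, h3⟩

-- the whole fold
theorem pvFold_sim (n : Int) (l : List (List Int))
    (hpre : ∀ k ∈ l, 3 ≤ k.length ∧ 1 - n ≤ k.getD 0 0 ∧ k.getD 0 0 ≤ n ∧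
      1 - n ≤ k.getD 1 0 ∧ k.getD 1 0 ≤ n)
    (p c : List (List Int)) (root : List Int) (mems : List (List Int))
    (hsh : pvShape n p) (hinv : pvInv n c root mems) :
    (l.foldl pvStepA (p, c)).1 = (l.foldl pvStepB (p, root, mems)).1 := by
  induction l generalizing p c root mems with
  | nil => rfl
  | cons k rest ih =>
    obtain ⟨hk3, h01, h02, h11, h12⟩ := hpre k List.mem_cons_self
    obtain ⟨heq, hsh', hinv'⟩ := pvStep_sim n k p c root mems ⟨h01, h02⟩ ⟨h11, h12⟩ hsh hinv
    rw [List.foldl_cons, List.foldl_cons,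
      show pvStepA (p, c) k = ((pvStepB (p, root, mems) k).1, (pvStepA (p, c) k).2) from
        Prod.ext heq rfl]
    rw [heq] at hsh'
    exact ih (fun k' hk' => hpre k' (List.mem_cons_of_mem _ hk')) _ _ _ _ hsh' hinv'

-- the initial states are related
theorem pvInit_inv (n : Int) :
    pvInv n ((List.range n.toNat).map (fun i : Nat => ([(i : Int) + 1] : List Int)))
      ((List.range n.toNat).map (fun i : Nat => (i : Int)))
      ((List.range n.toNat).map (fun i : Nat => ([(i : Int) + 1] : List Int))) := by
  have hRT : ∀ v, pvRng n v →
      pvRT ((List.range n.toNat).map (fun i : Nat => (i : Int))) v = v - 1 := by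
    intro v hv
    unfold pvRT
    rw [PySem.List.getD_map_range _ _ _ _ (by rcases hv with ⟨u1, u2⟩; omega)]
    rcases hv with ⟨u1, u2⟩; omega
  have hCA : ∀ v, pvRng n v →
      pvCA ((List.range n.toNat).map (fun i : Nat => ([(i : Int) + 1] : List Int))) v = [v] := by
    intro v hv
    unfold pvCA
    rw [PySem.List.getD_map_range _ _ _ _ (by rcases hv with ⟨u1, u2⟩; omega)]
    congr 1
    rcases hv with ⟨u1, u2⟩; omega
  have hMB : ∀ v, pvRng n v →
      pvMB ((List.range n.toNat).map (fun i : Nat => (i : Int)))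
        ((List.range n.toNat).map (fun i : Nat => ([(i : Int) + 1] : List Int))) v = [v] := by
    intro v hv
    unfold pvMB
    rw [hRT v hv, PySem.List.getD_map_range _ _ _ _ (by rcases hv with ⟨u1, u2⟩; omega)]
    congr 1
    rcases hv with ⟨u1, u2⟩; omega
  refine ⟨by simp, by simp, by simp, ?_, ?_, ?_, ?_, ?_, ?_⟩
  · intro v hv
    rw [hRT v hv]
    rcases hv with ⟨u1, u2⟩
    omega
  · intro v w hv hw heq
    rw [hRT v hv, hRT w hw] at heq
    have : v = w := by omega
    rw [this]
  · intro v w hv hw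
    rw [hCA v hv, hRT v hv, hRT w hw, List.mem_singleton]
    omega
  · intro v w hv hw
    rw [hMB v hv, hRT v hv, hRT w hw, List.mem_singleton]
    omega
  · intro v hv x hx
    rw [hCA v hv, List.mem_singleton] at hx
    exact hx ▸ hv
  · intro v hv x hx
    rw [hMB v hv, List.mem_singleton] at hx
    exact hx ▸ hv

theorem pvInit_shape (n : Int) :
    pvShape n (List.replicate n.toNat (List.replicate n.toNat (0 : Int))) := by
  refine ⟨by simp, ?_⟩
  intro t
  unfold pvRowLen
  by_cases h : t < n.toNat
  · rw [if_pos h, List.getD_eq_getElem?_getD, List.getElem?_replicate, if_pos h]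
    simp
  · rw [if_neg h, List.getD_eq_getElem?_getD, List.getElem?_replicate, if_neg h]
    simp

-- ===== VERDICT (by name: the statement is the Claim_ definition above) =====
theorem likekruskal_spec : Claim_equal_likekruskal := by
  intro l n _ hpre
  unfold Spec_likekruskal likekruskal likekruskal_alt
  exact pvFold_sim n l hpre _ _ _ _ (pvInit_shape n) (pvInit_inv n)
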